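-- pv_equiv track=rewrite | github.com/alexandraback/datacollection | solutions_5670465267826688_1/Python/jmzhao/c.py | check
-- ===== SOURCE A (Python) =====
-- Q = [
--     [0,  1,  2,  3,  4],
--     [1,  1,  2,  3,  4],
--     [2,  2, -1,  4, -3],
--     [3,  3, -4, -1,  2],
--     [4,  4,  3, -2, -1]
-- ]
--
-- ch2q = dict(zip('ijk', (2,3,4)))
--
-- def q(a, b) :
--     sgn = 1
--     if a < 0 :
--         sgn = -1
--     if b < 0 :
--         sgn *= -1
--     return sgn * Q[abs(a)][abs(b)]
--
-- def p(xq, x) :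
--     ans = 1
--     for i in range(x%4) :
--         ans = q(ans, xq)
--     return ans
--
-- def check(s, x) :
--     acc = 1
--     f = list()
--     for ch in s :
--         acc = q(acc, ch2q[ch])
--         f.append(acc)
-- #    printerr(f)
--     final = p(acc, x)
--     if final != -1 :
--         return False
--     hasi = hasj = False
--     for _, b in zip(range(x), (1, acc, q(acc,acc), q(acc,q(acc,acc)),
--                           1, acc, q(acc,acc), q(acc,q(acc,acc)))) :
--         for a in f :
--             if not hasi :
--                 if q(b, a) == 2 :
--                     hasi = True
--             elif not hasj :
--                 if q(b, a) == 4 :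
--                     hasj = True
--                     return True
--     return False
-- ===== SOURCE B (Python) =====
-- _T = [
--     [0,  1,  2,  3,  4],
--     [1,  1,  2,  3,  4],
--     [2,  2, -1,  4, -3],
--     [3,  3, -4, -1,  2],
--     [4,  4,  3, -2, -1]
-- ]
--
-- _C2Q = {'i': 2, 'j': 3, 'k': 4}
--
-- def _mul(a, b):
--     return (-1 if (a < 0) != (b < 0) else 1) * _T[abs(a)][abs(b)]
--
-- def check(s, x):
--     # total product of one copy of s
--     acc = 1
--     for ch in s:
--         acc = _mul(acc, _C2Q[ch])
--     # whole product over x copies (period 4)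
--     total = 1
--     for _ in range(x % 4):
--         total = _mul(total, acc)
--     if total != -1:
--         return False
--     # single flat scan of min(x, 8) copies with one running product
--     cur = 1
--     hasi = False
--     for _ in range(min(x, 8)):
--         for ch in s:
--             cur = _mul(cur, _C2Q[ch])
--             if not hasi:
--                 if cur == 2:
--                     hasi = True
--             elif cur == 4:
--                 return True
--     return False
-- ===== Notes on version B (the rewrite author's own statement) =====
-- stated objective: simpler
-- what changed: B drops A's prefix-product list f and its 8-entry power tuple: after checking total^(x%4) == -1 it makes one flat scan over min(x,8) repetitions of s with a single running quaternion product, setting hasi when the product is i and returning True at a later k.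
import Mathlib
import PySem

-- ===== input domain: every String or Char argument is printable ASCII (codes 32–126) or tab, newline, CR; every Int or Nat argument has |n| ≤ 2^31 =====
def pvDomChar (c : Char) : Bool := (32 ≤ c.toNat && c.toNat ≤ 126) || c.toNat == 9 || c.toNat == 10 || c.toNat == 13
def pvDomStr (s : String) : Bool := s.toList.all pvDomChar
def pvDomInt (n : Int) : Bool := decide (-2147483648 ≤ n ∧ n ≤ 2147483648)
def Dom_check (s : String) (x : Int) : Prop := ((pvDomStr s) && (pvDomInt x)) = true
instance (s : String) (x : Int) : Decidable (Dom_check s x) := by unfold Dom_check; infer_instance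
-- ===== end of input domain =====

-- B replaces A's prefix-product table and 8-entry power tuple by a single flat scan of the
-- min(x,8) repetitions with one running quaternion product (objective: simpler decomposition).

-- ===== PORT A =====
def Qtab : List (List Int) :=
  [[0,  1,  2,  3,  4],
   [1,  1,  2,  3,  4],
   [2,  2, -1,  4, -3],
   [3,  3, -4, -1,  2],
   [4,  4,  3, -2, -1]]

def ch2q : PySem.Dict Char Int := PySem.Dict.ofList [('i', 2), ('j', 3), ('k', 4)]

-- q(a, b); the indices |a|, |b| are ≤ 4 for every value the program feeds in, so the
-- IndexError branch (pyGet? = none) is unreachable and getD 0 is never taken.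
def qf (a b : Int) : Int :=
  let sgn : Int := if a < 0 then -1 else 1
  let sgn : Int := if b < 0 then sgn * -1 else sgn
  sgn * (PySem.List.pyGet? ((PySem.List.pyGet? Qtab (a.natAbs : Int)).getD []) (b.natAbs : Int)).getD 0

def pA (xq x : Int) : Int :=
  (PySem.List.pyRange 0 (PySem.Int.mod x 4) 1).foldl (fun ans _ => qf ans xq) 1

-- inner 'for a in f' loop; returns (hasi, found-early-return)
def innerA (b : Int) (f : List Int) (hasi : Bool) : Bool × Bool :=
  match f with
  | [] => (hasi, false)
  | a :: rest =>
    if hasi = false then innerA b rest (if qf b a = 2 then true else hasi)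
    else if qf b a = 4 then (hasi, true)
    else innerA b rest hasi

-- outer 'for _, b in zip(range(x), bs)' loop
def outerA (f : List Int) (bs : List Int) (hasi : Bool) : Bool :=
  match bs with
  | [] => false
  | b :: rest =>
    let r := innerA b f hasi
    if r.2 then true else outerA f rest r.1

def check (s : String) (x : Int) : Bool :=
  -- KeyError on a character outside 'ijk' is excluded by Pre_check (getD 0 is never taken there)
  let st := s.toList.foldl
    (fun (st : Int × List Int) ch =>
      let acc := qf st.1 ((ch2q.get? ch).getD 0)
      (acc, st.2 ++ [acc])) (1, [])
  let acc := st.1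
  let f := st.2
  let final := pA acc x
  if final ≠ -1 then false
  else
    let bs : List Int := [1, acc, qf acc acc, qf acc (qf acc acc),
                          1, acc, qf acc acc, qf acc (qf acc acc)]
    -- zip(range(x), bs) iterates over the first min(x, 8) elements of bs: take is exact
    outerA f (bs.take x.toNat) false

-- ===== PORT B =====
def Tb : List (List Int) :=
  [[0,  1,  2,  3,  4],
   [1,  1,  2,  3,  4],
   [2,  2, -1,  4, -3],
   [3,  3, -4, -1,  2],
   [4,  4,  3, -2, -1]]

def c2qB : PySem.Dict Char Int := PySem.Dict.ofList [('i', 2), ('j', 3), ('k', 4)]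

def mulB (a b : Int) : Int :=
  (if (decide (a < 0)) ≠ (decide (b < 0)) then (-1 : Int) else 1) *
    (PySem.List.pyGet? ((PySem.List.pyGet? Tb (a.natAbs : Int)).getD []) (b.natAbs : Int)).getD 0

-- the 'for ch in s' body of the flat scan; returns (cur, hasi, found)
def innerB (cs : List Char) (cur : Int) (hasi : Bool) : Int × Bool × Bool :=
  match cs with
  | [] => (cur, hasi, false)
  | c :: rest =>
    let cur' := mulB cur ((c2qB.get? c).getD 0)
    if hasi = false then innerB rest cur' (if cur' = 2 then true else hasi)
    else if cur' = 4 then (cur', hasi, true)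
    else innerB rest cur' hasi

-- 'for _ in range(min(x, 8))'
def outerB (cs : List Char) (n : Nat) (cur : Int) (hasi : Bool) : Bool :=
  match n with
  | 0 => false
  | n + 1 =>
    let r := innerB cs cur hasi
    if r.2.2 then true else outerB cs n r.1 r.2.1

def check_alt (s : String) (x : Int) : Bool :=
  let cs := s.toList
  let acc := cs.foldl (fun a c => mulB a ((c2qB.get? c).getD 0)) 1
  let total := (PySem.List.pyRange 0 (PySem.Int.mod x 4) 1).foldl (fun t _ => mulB t acc) 1
  if total ≠ -1 then false
  else outerB cs (min x 8).toNat 1 false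

-- ===== PRECONDITION & SPEC =====
-- Pre_: A raises KeyError on any character outside 'ijk'; exactly those inputs are excluded.
def Pre_check (s : String) (x : Int) : Prop := (s.toList.all fun c => c == 'i' || c == 'j' || c == 'k') = true
instance (s : String) (x : Int) : Decidable (Pre_check s x) := by unfold Pre_check; infer_instance

def pvWitness_check : String × Int := ("ijk", 1)

def Spec_check (s : String) (x : Int) (out : Bool) : Prop := out = check_alt s x
instance (s : String) (x : Int) (out : Bool) : Decidable (Spec_check s x out) := by unfold Spec_check; infer_instance

-- ===== CLAIM (what is proved, stated in full; the proofs are below) =====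
def Claim_equal_check : Prop := ∀ (s : String) (x : Int), Dom_check s x → Pre_check s x → Spec_check s x (check s x)

-- ===== LEMMAS AND PROOFS =====

-- proof-side vocabulary
def UnitsS : List Int := [-4, -3, -2, -1, 1, 2, 3, 4]

def cv (c : Char) : Int := (ch2q.get? c).getD 0

def prodl (g : Int) (cs : List Char) : Int := cs.foldl (fun a c => qf a (cv c)) g

def scanq (g : Int) : List Char → List Int
  | [] => []
  | c :: cs => let g' := qf g (cv c); g' :: scanq g' cs

def powlist (acc cur : Int) : Nat → List Int
  | 0 => []
  | n + 1 => cur :: powlist acc (qf cur acc) n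

theorem mulB_eq_qf (a b : Int) : mulB a b = qf a b := by
  by_cases ha : a < 0 <;> by_cases hb : b < 0 <;>
    simp [mulB, qf, ha, hb, Tb, Qtab]

theorem cvB_eq_cv (c : Char) : (c2qB.get? c).getD 0 = cv c := rfl

theorem qf_mem {a b : Int} (ha : a ∈ UnitsS) (hb : b ∈ UnitsS) : qf a b ∈ UnitsS := by
  fin_cases ha <;> fin_cases hb <;> decide

theorem qf_assoc {a b c : Int} (ha : a ∈ UnitsS) (hb : b ∈ UnitsS) (hc : c ∈ UnitsS) :
    qf (qf a b) c = qf a (qf b c) := by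
  fin_cases ha <;> fin_cases hb <;> fin_cases hc <;> decide

theorem qf_one {a : Int} (ha : a ∈ UnitsS) : qf a 1 = a := by
  fin_cases ha <;> decide

theorem cv_mem {c : Char} (h : c = 'i' ∨ c = 'j' ∨ c = 'k') : cv c ∈ UnitsS := by
  rcases h with h | h | h <;> subst h <;> decide

theorem prodl_mem {g : Int} {cs : List Char} (hg : g ∈ UnitsS)
    (hcs : ∀ c ∈ cs, cv c ∈ UnitsS) : prodl g cs ∈ UnitsS := by
  induction cs generalizing g with
  | nil => exact hg
  | cons c rest ih =>
    exact ih (qf_mem hg (hcs c (by simp))) (fun d hd => hcs d (by simp [hd]))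

theorem fold_build (cs : List Char) (g : Int) (l : List Int) :
    cs.foldl (fun (st : Int × List Int) ch =>
        let acc := qf st.1 ((ch2q.get? ch).getD 0)
        (acc, st.2 ++ [acc])) (g, l) = (prodl g cs, l ++ scanq g cs) := by
  induction cs generalizing g l with
  | nil => simp [prodl, scanq]
  | cons c rest ih =>
    simp only [List.foldl_cons, ih, prodl, scanq]
    simp [cv, List.append_assoc]

theorem pow8 {acc : Int} (h : acc ∈ UnitsS) :
    powlist acc 1 8 = [1, acc, qf acc acc, qf acc (qf acc acc),
                       1, acc, qf acc acc, qf acc (qf acc acc)] := by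
  fin_cases h <;> decide

theorem powlist_take (acc : Int) (n m : Nat) (cur : Int) :
    (powlist acc cur m).take n = powlist acc cur (min n m) := by
  induction m generalizing cur n with
  | zero => simp [powlist]
  | succ m ih =>
    cases n with
    | zero => simp [powlist]
    | succ n => simp [powlist, ih, Nat.succ_min_succ]

theorem inner_corr (cs : List Char) (g b : Int) (hasi : Bool)
    (hcs : ∀ c ∈ cs, cv c ∈ UnitsS) (hb : b ∈ UnitsS) (hg : g ∈ UnitsS) :
    ((innerB cs (qf b g) hasi).2 = innerA b (scanq g cs) hasi) ∧
    ((innerB cs (qf b g) hasi).2.2 = false →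
      (innerB cs (qf b g) hasi).1 = qf b (prodl g cs)) := by
  induction cs generalizing g hasi with
  | nil => exact ⟨rfl, fun _ => rfl⟩
  | cons c rest ih =>
    have hc : cv c ∈ UnitsS := hcs c (by simp)
    have hrest : ∀ d ∈ rest, cv d ∈ UnitsS := fun d hd => hcs d (by simp [hd])
    have hg' : qf g (cv c) ∈ UnitsS := qf_mem hg hc
    have hcur : mulB (qf b g) ((c2qB.get? c).getD 0) = qf b (qf g (cv c)) := by
      rw [mulB_eq_qf, cvB_eq_cv, qf_assoc hb hg hc]
    have hpr : prodl g (c :: rest) = prodl (qf g (cv c)) rest := rfl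
    cases hasi with
    | false =>
      simp only [innerB, innerA, scanq, hcur, hpr]
      simpa using ih (qf g (cv c)) (if qf b (qf g (cv c)) = 2 then true else false) hrest hg'
    | true =>
      simp only [innerB, innerA, scanq, hcur, hpr]
      by_cases h4 : qf b (qf g (cv c)) = 4
      · simp [h4]
      · simpa [h4] using ih (qf g (cv c)) true hrest hg'

theorem outer_corr (n : Nat) (cs : List Char) (b : Int) (hasi : Bool)
    (hcs : ∀ c ∈ cs, cv c ∈ UnitsS) (hb : b ∈ UnitsS) :
    outerA (scanq 1 cs) (powlist (prodl 1 cs) b n) hasi = outerB cs n b hasi := by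
  induction n generalizing b hasi with
  | zero => rfl
  | succ n ih =>
    have h1 : (1 : Int) ∈ UnitsS := by decide
    have hib : innerB cs b hasi = innerB cs (qf b 1) hasi := by rw [qf_one hb]
    have hcorr := inner_corr cs 1 b hasi hcs hb h1
    have hacc : prodl 1 cs ∈ UnitsS := prodl_mem h1 hcs
    simp only [outerA, outerB, powlist, hib]
    rw [hcorr.1]
    by_cases hf : (innerA b (scanq 1 cs) hasi).2 = true
    · simp [hf]
    · have hf' : (innerA b (scanq 1 cs) hasi).2 = false := by
        cases h : (innerA b (scanq 1 cs) hasi).2 <;> simp_all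
      have hcurval : (innerB cs (qf b 1) hasi).1 = qf b (prodl 1 cs) := by
        apply hcorr.2; rw [hcorr.1]; exact hf'
      rw [hf']
      simp only [Bool.false_eq_true, if_false]
      rw [hcurval, ih (qf b (prodl 1 cs)) (innerA b (scanq 1 cs) hasi).1
        (qf_mem hb hacc)]

theorem accB_eq_prodl (cs : List Char) :
    cs.foldl (fun a c => mulB a ((c2qB.get? c).getD 0)) 1 = prodl 1 cs := by
  have : (fun (a : Int) (c : Char) => mulB a ((c2qB.get? c).getD 0)) =
      (fun a c => qf a (cv c)) := by
    funext a c; rw [mulB_eq_qf, cvB_eq_cv]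
  rw [prodl, this]

theorem min_toNat (x : Int) : (min x 8).toNat = min x.toNat 8 := by omega

-- ===== VERDICT (by name: the statement is the Claim_ definition above) =====
theorem check_spec : Claim_equal_check := by
  intro s x _ hpre
  unfold Spec_check check check_alt
  have hpre' : ∀ c ∈ s.toList, c = 'i' ∨ c = 'j' ∨ c = 'k' := by
    intro c hc
    have h := List.all_eq_true.mp hpre c hc
    simpa [or_assoc] using h
  have hcs : ∀ c ∈ s.toList, cv c ∈ UnitsS := fun c hc => cv_mem (hpre' c hc)
  have h1 : (1 : Int) ∈ UnitsS := by decide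
  have hacc : prodl 1 s.toList ∈ UnitsS := prodl_mem h1 hcs
  have hfin : (PySem.List.pyRange 0 (PySem.Int.mod x 4) 1).foldl
      (fun t (_ : Int) => mulB t (prodl 1 s.toList)) 1 = pA (prodl 1 s.toList) x := by
    unfold pA
    congr 1
    funext t u
    rw [mulB_eq_qf]
  simp only [fold_build, accB_eq_prodl, List.nil_append, hfin]
  by_cases hne : pA (prodl 1 s.toList) x = -1
  · simp only [hne, ne_eq, not_true_eq_false, if_false]
    rw [← pow8 hacc, powlist_take, min_toNat]
    exact outer_corr _ s.toList 1 false hcs h1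
  · simp [hne]
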